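-- pv_equiv track=rewrite | github.com/AbyssScript/Customer-Churn-Prediction-for-Telecom | app.py | try_to_guess_index
-- ===== SOURCE A (Python) =====
-- def try_to_guess_index(col, options):
--     """Helper to find the best match in the selectbox for column mapping. Case-insensitive."""
--     if not options: # Handle empty list
--         return 0
--     col_lower = col.lower().replace("_", "").replace(" ", "")
--     for i, option in enumerate(options):
--         opt_lower = str(option).lower().replace("_", "").replace(" ", "")
--         if opt_lower == col_lower:
--             return i
--     # Try a partial match if no exact match
--     for i, option in enumerate(options):
--         opt_lower = str(option).lower().replace("_", "").replace(" ", "")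
--         if col_lower in opt_lower:
--             return i
--     return 0
-- ===== SOURCE B (Python) =====
-- def try_to_guess_index(col, options):
--     """Single pass: return the first exact normalized match immediately; remember
--     the first partial (substring) match in an accumulator; fall back to it, else 0."""
--     if not options:
--         return 0
--
--     def norm(s):
--         return str(s).lower().replace("_", "").replace(" ", "")
--
--     target = norm(col)
--     partial = -1
--     for i, option in enumerate(options):
--         o = norm(option)
--         if o == target:
--             return i
--         if partial < 0 and target in o:
--             partial = i
--     return partial if partial >= 0 else 0
-- ===== Notes on version B (the rewrite author's own statement) =====
-- stated objective: alternative
-- what changed: A scans the options twice (an exact-match pass, then a partial-match pass), normalizing every option in each pass; B makes a single pass that normalizes each option once, returning immediately on an exact match and recording the first partial-match index in an accumulator (sentinel -1), falling back to it, else 0.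
import Mathlib
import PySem

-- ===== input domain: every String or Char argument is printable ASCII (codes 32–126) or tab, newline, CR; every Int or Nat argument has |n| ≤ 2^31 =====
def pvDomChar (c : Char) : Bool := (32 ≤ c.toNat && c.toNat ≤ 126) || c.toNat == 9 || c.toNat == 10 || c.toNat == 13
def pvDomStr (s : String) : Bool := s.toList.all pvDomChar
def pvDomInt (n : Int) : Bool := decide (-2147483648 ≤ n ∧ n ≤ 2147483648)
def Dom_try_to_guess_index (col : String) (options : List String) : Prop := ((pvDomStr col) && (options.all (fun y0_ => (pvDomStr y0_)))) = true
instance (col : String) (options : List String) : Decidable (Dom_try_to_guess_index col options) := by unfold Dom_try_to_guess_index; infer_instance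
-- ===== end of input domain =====

-- B replaces A's two scans (exact pass, then partial pass, each normalizing every option)
-- by a single pass that normalizes each option once and keeps the first partial-match index
-- in an accumulator; equal return values are proved below.

-- shared normalization: s.lower().replace("_", "").replace(" ", "")
def pvNorm (s : String) : String :=
  PySem.Str.replace (PySem.Str.replace (PySem.Str.lower s) "_" "") " " ""

-- ===== PORT A =====
-- first loop: return i on exact normalized match
def tgExact (colLower : String) (i : Int) : List String → Option Int
  | [] => none
  | o :: rest =>
    if pvNorm o = colLower then some i else tgExact colLower (i + 1) rest

-- second loop: return i when col_lower is a substring of the normalized option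
def tgPartial (colLower : String) (i : Int) : List String → Option Int
  | [] => none
  | o :: rest =>
    if PySem.Str.isIn colLower (pvNorm o) then some i else tgPartial colLower (i + 1) rest

def try_to_guess_index (col : String) (options : List String) : Int :=
  if options = [] then 0
  else
    let colLower := pvNorm col
    match tgExact colLower 0 options with
    | some i => i
    | none =>
      match tgPartial colLower 0 options with
      | some i => i
      | none => 0

-- ===== PORT B =====
-- single loop: return on exact match, record the first partial match in `part` (sentinel -1)
def tgAltLoop (target : String) (i : Int) (part : Int) : List String → Int
  | [] => if part ≥ 0 then part else 0
  | o :: rest =>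
    let n := pvNorm o
    if n = target then i
    else tgAltLoop target (i + 1)
           (if part < 0 ∧ PySem.Str.isIn target n = true then i else part) rest

def try_to_guess_index_alt (col : String) (options : List String) : Int :=
  if options = [] then 0
  else tgAltLoop (pvNorm col) 0 (-1) options

-- ===== PRECONDITION & SPEC =====
def Spec_try_to_guess_index (col : String) (options : List String) (out : Int) : Prop := out = try_to_guess_index_alt col options
instance (col : String) (options : List String) (out : Int) : Decidable (Spec_try_to_guess_index col options out) := by unfold Spec_try_to_guess_index; infer_instance

-- ===== CLAIM (what is proved, stated in full; the proofs are below) =====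
def Claim_equal_try_to_guess_index : Prop := ∀ (col : String) (options : List String), Dom_try_to_guess_index col options → Spec_try_to_guess_index col options (try_to_guess_index col options)

-- ===== LEMMAS AND PROOFS =====

-- loop invariant: B's single pass equals A's exact pass, falling back to the recorded
-- partial index (if ≥ 0) and otherwise to A's partial pass
lemma tgAltLoop_eq (t : String) (l : List String) : ∀ (i p : Int), 0 ≤ i →
    tgAltLoop t i p l =
      (match tgExact t i l with
       | some j => j
       | none =>
         if p ≥ 0 then p
         else match tgPartial t i l with
              | some j => j
              | none => 0) := by
  induction l with
  | nil =>
    intro i p _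
    simp [tgAltLoop, tgExact, tgPartial]
  | cons o rest ih =>
    intro i p hi
    rw [show tgAltLoop t i p (o :: rest) = (if pvNorm o = t then i
          else tgAltLoop t (i + 1)
            (if p < 0 ∧ PySem.Str.isIn t (pvNorm o) = true then i else p) rest)
        from by simp only [tgAltLoop],
        show tgExact t i (o :: rest)
            = (if pvNorm o = t then some i else tgExact t (i + 1) rest)
        from by simp only [tgExact],
        show tgPartial t i (o :: rest)
            = (if PySem.Str.isIn t (pvNorm o) then some i else tgPartial t (i + 1) rest)
        from by simp only [tgPartial]]
    by_cases hex : pvNorm o = t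
    · rw [if_pos hex, if_pos hex]
    · rw [if_neg hex, if_neg hex]
      by_cases hp : p ≥ 0
      · rw [if_neg (show ¬(p < 0 ∧ PySem.Str.isIn t (pvNorm o) = true)
              from fun h => absurd h.1 (by omega)),
            ih (i + 1) p (by omega), if_pos hp, if_pos hp]
      · have hplt : p < 0 := by omega
        by_cases hin : PySem.Str.isIn t (pvNorm o) = true
        · rw [if_pos (show p < 0 ∧ PySem.Str.isIn t (pvNorm o) = true from ⟨hplt, hin⟩),
              ih (i + 1) i (by omega), if_pos (show i ≥ 0 from hi), if_neg hp, if_pos hin]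
        · rw [if_neg (show ¬(p < 0 ∧ PySem.Str.isIn t (pvNorm o) = true)
              from fun h => hin h.2),
              ih (i + 1) p (by omega), if_neg hp, if_neg hp, if_neg hin]

-- ===== VERDICT (by name: the statement is the Claim_ definition above) =====
theorem try_to_guess_index_spec : Claim_equal_try_to_guess_index := by
  intro col options _
  unfold Spec_try_to_guess_index try_to_guess_index try_to_guess_index_alt
  by_cases h : options = []
  · simp [h]
  · simp only [h, if_false]
    rw [tgAltLoop_eq (pvNorm col) options 0 (-1) le_rfl]
    norm_num
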